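-- pv_equiv track=rewrite | github.com/mnguegnang/Agentic-ERP-end-to-end-development | fine_tune/prepare_dataset.py | _synthetic_pairs
-- ===== SOURCE A (Python) =====
-- def _synthetic_pairs(n: int) -> list[dict[str, str]]:
--     """Generate n synthetic DPO preference pairs for smoke-testing."""
--     templates = [
--         ("kg_query", "Display the supply network for component BRG-009",
--          "traverse_supply_network(entity_name='BRG-009', relation_type='PROVIDES')",
--          "I don't know the answer."),
--         ("mcnf_solve", "Optimize flow of 300 units from S1 to D2",
--          "solve_mcnf(nodes=['S1','D2'], arcs=[...], commodities=[...])",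
--          "The flow cannot be determined."),
--         ("contract_query", "What does the force majeure clause say?",
--          "search_contracts(query_text='force majeure clause conditions')",
--          "I am unable to search contracts."),
--         ("disruption_resource", "Supplier BRA-Metals is offline — find alternatives",
--          "solve_disruption(disrupted_supplier='BRA-Metals', component='metal')",
--          "No alternative found."),
--         ("meio_optimize", "Optimize safety stock for 3-echelon network",
--          "solve_meio_gsm(stages=[...], service_level=0.95)",
--          "Cannot optimize inventory."),
--     ]
--     pairs = []
--     for i in range(n):
--         tmpl = templates[i % len(templates)]
--         pairs.append({"prompt": tmpl[1], "chosen": tmpl[2], "rejected": tmpl[3],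
--                        "intent": tmpl[0], "tool_used": tmpl[2].split("(")[0]})
--     return pairs
-- ===== SOURCE B (Python) =====
-- def _synthetic_pairs(n: int) -> list[dict[str, str]]:
--     """Generate n synthetic DPO preference pairs for smoke-testing."""
--     templates = [
--         ("kg_query", "Display the supply network for component BRG-009",
--          "traverse_supply_network(entity_name='BRG-009', relation_type='PROVIDES')",
--          "I don't know the answer."),
--         ("mcnf_solve", "Optimize flow of 300 units from S1 to D2",
--          "solve_mcnf(nodes=['S1','D2'], arcs=[...], commodities=[...])",
--          "The flow cannot be determined."),
--         ("contract_query", "What does the force majeure clause say?",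
--          "search_contracts(query_text='force majeure clause conditions')",
--          "I am unable to search contracts."),
--         ("disruption_resource", "Supplier BRA-Metals is offline — find alternatives",
--          "solve_disruption(disrupted_supplier='BRA-Metals', component='metal')",
--          "No alternative found."),
--         ("meio_optimize", "Optimize safety stock for 3-echelon network",
--          "solve_meio_gsm(stages=[...], service_level=0.95)",
--          "Cannot optimize inventory."),
--     ]
--     # Stage 1: finish the five dicts once.
--     base = []
--     for intent, prompt, chosen, rejected in templates:
--         base.append({"prompt": prompt, "chosen": chosen, "rejected": rejected,
--                      "intent": intent, "tool_used": chosen.partition("(")[0]})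
--     if n <= 0:
--         return []
--     # Stage 2: emit whole cycles by list repetition plus a remainder prefix,
--     # copying each dict so the n entries are distinct objects.
--     q, r = divmod(n, 5)
--     return [dict(d) for d in base * q + base[:r]]
-- ===== Notes on version B (the rewrite author's own statement) =====
-- stated objective: simpler
-- what changed: B is staged: it finishes the template dicts once (tool name via str.partition), then emits the outputs as whole cycles built by list repetition plus a remainder prefix (with per-entry copies), instead of A's single per-index loop that rebuilds each dict via modulo indexing and a split.
import Mathlib
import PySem

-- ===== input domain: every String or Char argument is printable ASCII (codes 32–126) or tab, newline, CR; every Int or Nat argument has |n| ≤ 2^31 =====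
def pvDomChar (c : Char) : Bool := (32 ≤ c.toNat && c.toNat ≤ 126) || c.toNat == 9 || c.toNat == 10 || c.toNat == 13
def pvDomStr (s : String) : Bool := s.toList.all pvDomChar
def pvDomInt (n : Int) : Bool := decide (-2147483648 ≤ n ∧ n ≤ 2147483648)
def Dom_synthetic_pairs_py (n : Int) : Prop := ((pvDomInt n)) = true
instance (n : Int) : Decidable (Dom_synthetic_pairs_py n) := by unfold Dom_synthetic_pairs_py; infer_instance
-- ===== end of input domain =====

-- B finishes the five dicts once, then emits n//5 whole cycles by list repetition plus a
-- remainder prefix (simpler staged decomposition); same return value, no observable mutation.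

-- ===== PORT A =====
-- A's templates list: (intent, prompt, chosen, rejected)
def pvTemplatesA : List (String × String × String × String) :=
  [ ("kg_query", "Display the supply network for component BRG-009",
     "traverse_supply_network(entity_name='BRG-009', relation_type='PROVIDES')",
     "I don't know the answer."),
    ("mcnf_solve", "Optimize flow of 300 units from S1 to D2",
     "solve_mcnf(nodes=['S1','D2'], arcs=[...], commodities=[...])",
     "The flow cannot be determined."),
    ("contract_query", "What does the force majeure clause say?",
     "search_contracts(query_text='force majeure clause conditions')",
     "I am unable to search contracts."),
    ("disruption_resource", "Supplier BRA-Metals is offline — find alternatives",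
     "solve_disruption(disrupted_supplier='BRA-Metals', component='metal')",
     "No alternative found."),
    ("meio_optimize", "Optimize safety stock for 3-echelon network",
     "solve_meio_gsm(stages=[...], service_level=0.95)",
     "Cannot optimize inventory.") ]

def synthetic_pairs_py (n : Int) : List (List (String × String)) :=
  (PySem.List.pyRange 0 n 1).foldl
    (fun pairs i =>
      let tmpl := PySem.List.pyGetD pvTemplatesA
        (PySem.Int.mod i (pvTemplatesA.length : Int)) ("", "", "", "")
      pairs ++ [[("prompt", tmpl.2.1), ("chosen", tmpl.2.2.1), ("rejected", tmpl.2.2.2),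
                 ("intent", tmpl.1),
                 ("tool_used", PySem.List.pyGetD (((PySem.Str.split? tmpl.2.2.1 "(").getD [])) 0 "")]])
    []

-- ===== PORT B =====
def pvTemplatesB : List (String × String × String × String) :=
  [ ("kg_query", "Display the supply network for component BRG-009",
     "traverse_supply_network(entity_name='BRG-009', relation_type='PROVIDES')",
     "I don't know the answer."),
    ("mcnf_solve", "Optimize flow of 300 units from S1 to D2",
     "solve_mcnf(nodes=['S1','D2'], arcs=[...], commodities=[...])",
     "The flow cannot be determined."),
    ("contract_query", "What does the force majeure clause say?",
     "search_contracts(query_text='force majeure clause conditions')",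
     "I am unable to search contracts."),
    ("disruption_resource", "Supplier BRA-Metals is offline — find alternatives",
     "solve_disruption(disrupted_supplier='BRA-Metals', component='metal')",
     "No alternative found."),
    ("meio_optimize", "Optimize safety stock for 3-echelon network",
     "solve_meio_gsm(stages=[...], service_level=0.95)",
     "Cannot optimize inventory.") ]

-- s.partition(sep)[0]: the part of s before the first occurrence of sep
-- (the whole of s if sep does not occur) — hand port of str.partition's first
-- component via PySem.Str.find; exact on the domain since partition's before-part
-- is s[:s.find(sep)] when sep occurs and s otherwise.
def pvPartitionBefore (s sep : String) : String :=
  let f := PySem.Str.find s sep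
  if f = -1 then s else String.ofList (s.toList.take f.toNat)

-- Stage 1 of B: the five finished dicts, built once by a loop over the templates.
def pvBaseB : List (List (String × String)) :=
  pvTemplatesB.foldl
    (fun base t =>
      base ++ [[("prompt", t.2.1), ("chosen", t.2.2.1), ("rejected", t.2.2.2),
                ("intent", t.1), ("tool_used", pvPartitionBefore t.2.2.1 "(")]])
    []

-- Stage 2 of B: q whole cycles (list repetition) plus the first r dicts; dict(d) ↦ identity copy.
def synthetic_pairs_py_alt (n : Int) : List (List (String × String)) :=
  if n ≤ 0 then []
  else
    let q := PySem.Int.floordiv n 5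
    let r := PySem.Int.mod n 5
    (PySem.List.pyRepeat pvBaseB q ++ PySem.List.slice pvBaseB none (some r)).map (fun d => d)

-- ===== PRECONDITION & SPEC =====
def Spec_synthetic_pairs_py (n : Int) (out : List (List (String × String))) : Prop := out = synthetic_pairs_py_alt n
instance (n : Int) (out : List (List (String × String))) : Decidable (Spec_synthetic_pairs_py n out) := by unfold Spec_synthetic_pairs_py; infer_instance

-- ===== CLAIM =====
def Claim_equal_synthetic_pairs_py : Prop := ∀ (n : Int), Dom_synthetic_pairs_py n → Spec_synthetic_pairs_py n (synthetic_pairs_py n)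

-- ===== LEMMAS AND PROOFS =====

-- A's per-slot dict at index i (0 ≤ i) is B's base-table entry at i % 5.
lemma pv_slot_eq (i : Int) (hi : 0 ≤ i) :
    (let tmpl := PySem.List.pyGetD pvTemplatesA
        (PySem.Int.mod i (pvTemplatesA.length : Int)) ("", "", "", "")
     [("prompt", tmpl.2.1), ("chosen", tmpl.2.2.1), ("rejected", tmpl.2.2.2),
      ("intent", tmpl.1),
      ("tool_used", PySem.List.pyGetD (((PySem.Str.split? tmpl.2.2.1 "(").getD [])) 0 "")] :
        List (String × String))
    = pvBaseB.getD (i.toNat % 5) [] := by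
  have h5a : (pvTemplatesA.length : Int) = 5 := by decide
  rw [h5a]
  have hm : PySem.Int.mod i 5 = i % 5 := PySem.Int.mod_eq_emod_of_pos (by omega)
  rw [hm]
  have hmn : i % 5 = ((i.toNat % 5 : Nat) : Int) := by omega
  rw [hmn]
  have : i.toNat % 5 = 0 ∨ i.toNat % 5 = 1 ∨ i.toNat % 5 = 2 ∨ i.toNat % 5 = 3 ∨ i.toNat % 5 = 4 := by omega
  rcases this with h | h | h | h | h <;> rw [h] <;> rfl

-- Cycling lookup over range m equals whole-cycle replication plus a remainder prefix.
lemma pv_cycle_eq {α : Type} (base : List α) (d : α) (hlen : base.length = 5) (m : Nat) :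
    (List.range m).map (fun k => base.getD (k % 5) d)
      = (List.replicate (m / 5) base).flatten ++ base.take (m % 5) := by
  induction m with
  | zero => simp
  | succ m ih =>
    rw [List.range_succ, List.map_append, ih]
    by_cases h4 : m % 5 = 4
    · have hq : (m + 1) / 5 = m / 5 + 1 := by omega
      have hr : (m + 1) % 5 = 0 := by omega
      rw [hq, hr]
      have hget : base.getD (m % 5) d = base[4]'(by omega) := by
        rw [h4]; exact List.getD_eq_getElem base d (by omega)
      have htake : base.take (m % 5) ++ [base[4]'(by omega)] = base := by
        rw [h4]
        have := List.take_concat_get (l := base) (i := 4) (by omega)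
        simp only [List.concat_eq_append] at this
        rw [this, List.take_of_length_le (by omega : base.length ≤ 5)]
      rw [List.append_assoc]
      simp only [List.map_cons, List.map_nil]
      rw [hget, htake]
      simp [List.replicate_succ' (n := m / 5)]
    · have hq : (m + 1) / 5 = m / 5 := by omega
      have hr : (m + 1) % 5 = m % 5 + 1 := by omega
      rw [hq, hr]
      have hget : base.getD (m % 5) d = base[m % 5]'(by omega) := List.getD_eq_getElem base d (by omega)
      rw [List.append_assoc]
      simp only [List.map_cons, List.map_nil]
      rw [hget]
      congr 1
      have := List.take_concat_get (l := base) (i := m % 5) (by omega)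
      simp only [List.concat_eq_append] at this
      exact this

theorem synthetic_pairs_py_eq_alt (n : Int) : synthetic_pairs_py n = synthetic_pairs_py_alt n := by
  unfold synthetic_pairs_py synthetic_pairs_py_alt
  rw [PySem.List.foldl_append_singleton_eq_map]
  by_cases hn : n ≤ 0
  · simp [hn, PySem.List.pyRange_one_eq_nil (by omega : n ≤ 0)]
  · simp only [if_neg hn]
    replace hn : 0 < n := by omega
    have hq : PySem.Int.floordiv n 5 = (n.toNat / 5 : Nat) := by
      rw [PySem.Int.floordiv_eq_ediv_of_pos (by omega)]
      omega
    have hr : PySem.Int.mod n 5 = (n.toNat % 5 : Nat) := by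
      rw [PySem.Int.mod_eq_emod_of_pos (by omega)]
      omega
    rw [hq, hr, PySem.List.slice_to _ (by positivity)]
    rw [PySem.List.pyRange_one]
    rw [List.map_map]
    have hstep : ∀ k ∈ List.range (n - 0).toNat,
        ((fun i =>
          (let tmpl := PySem.List.pyGetD pvTemplatesA
              (PySem.Int.mod i (pvTemplatesA.length : Int)) ("", "", "", "")
           [("prompt", tmpl.2.1), ("chosen", tmpl.2.2.1), ("rejected", tmpl.2.2.2),
            ("intent", tmpl.1),
            ("tool_used", PySem.List.pyGetD (((PySem.Str.split? tmpl.2.2.1 "(").getD [])) 0 "")]))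
          ∘ (fun k : Nat => (0 : Int) + k)) k
        = pvBaseB.getD (k % 5) [] := by
      intro k _
      simp only [Function.comp, zero_add]
      have := pv_slot_eq (k : Int) (by positivity)
      simpa using this
    rw [List.map_congr_left hstep]
    have h0 : (n - 0).toNat = n.toNat := by omega
    rw [h0, pv_cycle_eq pvBaseB [] (by decide) n.toNat]
    simp only [PySem.List.pyRepeat, Int.toNat_natCast, List.nil_append]
    rw [show (fun d : List (String × String) => d) = id from rfl, List.map_id]

-- ===== VERDICT =====
theorem synthetic_pairs_py_spec : Claim_equal_synthetic_pairs_py := by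
  intro n _
  unfold Spec_synthetic_pairs_py
  exact synthetic_pairs_py_eq_alt n
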